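-- pv_equiv track=rewrite | github.com/sytelus/nanuGPT | scripts/datasets/gsm8k/gsm8k_graph_analysis.py | github_slug
-- ===== SOURCE A (Python) =====
-- from typing import Any, Dict, Iterable, List, Optional, Sequence, Tuple
--
-- def github_slug(text: str) -> str:
--     slug_chars: List[str] = []
--     last_dash = False
--     for ch in text.lower():
--         if ch.isalnum():
--             slug_chars.append(ch)
--             last_dash = False
--         elif ch in {" ", "-", "_"}:
--             if not last_dash:
--                 slug_chars.append("-")
--                 last_dash = True
--         else:
--             continue
--     slug = "".join(slug_chars).strip("-")
--     return slug or "section"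
-- ===== SOURCE B (Python) =====
-- def _norm(ch: str) -> str:
--     # per-character normalisation: keep alnum, turn separators into a space, drop the rest
--     if ch.isalnum():
--         return ch
--     if ch in " -_":
--         return " "
--     return ""
--
--
-- def github_slug(text: str) -> str:
--     words = "".join(map(_norm, text.lower())).split()
--     return "-".join(words) if words else "section"
-- ===== Notes on version B (the rewrite author's own statement) =====
-- stated objective: simpler
-- what changed: Replaces A's stateful single pass (a last-dash flag, eager dash emission, a final strip of dashes) by a stateless pipeline: map every character through a tiny normaliser (itself, a space, or nothing), let split() collapse runs and trim, and join the resulting words with dashes.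
import Mathlib
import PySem

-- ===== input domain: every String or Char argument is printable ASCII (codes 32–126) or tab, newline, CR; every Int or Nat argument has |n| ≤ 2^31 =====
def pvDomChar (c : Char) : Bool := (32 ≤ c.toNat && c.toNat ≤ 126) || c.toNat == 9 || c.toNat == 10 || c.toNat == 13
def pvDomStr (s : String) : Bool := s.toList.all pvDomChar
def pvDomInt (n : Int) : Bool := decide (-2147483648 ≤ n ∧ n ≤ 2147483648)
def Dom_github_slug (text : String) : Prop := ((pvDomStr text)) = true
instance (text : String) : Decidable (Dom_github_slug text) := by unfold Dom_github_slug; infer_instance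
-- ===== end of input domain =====

-- B replaces A's stateful pass (last_dash flag + final strip('-')) by a stateless
-- normalise-each-char / split() / join pipeline; objective: simpler.

-- ===== PORT A =====
-- A's loop body (append to slug_chars / conditionally append '-' guarded by last_dash / skip)
def pvStepA (st : List Char × Bool) (ch : Char) : List Char × Bool :=
  if PySem.Chars.isalnum ch then (st.1 ++ [ch], false)
  else if ch == ' ' || ch == '-' || ch == '_' then
    (if st.2 = false then (st.1 ++ ['-'], true) else st)
  else st

-- literal transliteration of A: fold carrying (slug_chars, last_dash), then
-- slug = "".join(slug_chars).strip("-"), then `slug or "section"`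
def github_slug (text : String) : String :=
  if PySem.Str.stripChars
      (String.ofList ((PySem.Str.lower text).toList.foldl pvStepA (([] : List Char), false)).1) "-" = ""
  then "section"
  else PySem.Str.stripChars
      (String.ofList ((PySem.Str.lower text).toList.foldl pvStepA (([] : List Char), false)).1) "-"

-- ===== PORT B =====
-- B's per-character normaliser _norm: itself / a single space / the empty string
def pvNorm (c : Char) : List Char :=
  if PySem.Chars.isalnum c then [c] else if c == ' ' || c == '-' || c == '_' then [' '] else []

-- literal transliteration of B: words = "".join(map(_norm, text.lower())).split();
-- return "-".join(words) if words else "section"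
def github_slug_alt (text : String) : String :=
  match PySem.Str.split₀ (String.ofList ((PySem.Str.lower text).toList.flatMap pvNorm)) with
  | [] => "section"
  | ws => PySem.Str.join "-" ws

-- ===== PRECONDITION & SPEC =====
def Spec_github_slug (text : String) (out : String) : Prop := out = github_slug_alt text
instance (text : String) (out : String) : Decidable (Spec_github_slug text out) := by unfold Spec_github_slug; infer_instance

-- ===== CLAIM (what is proved, stated in full; the proofs are below) =====
def Claim_equal_github_slug : Prop := ∀ (text : String), Dom_github_slug text → Spec_github_slug text (github_slug text)

-- ===== LEMMAS AND PROOFS =====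

-- classification helper: the separator set {' ', '-', '_'}
def pvSep (c : Char) : Bool := c == ' ' || c == '-' || c == '_'

-- A's loop as a structural recursion in "future" form
def pvFA : List Char → Bool → List Char
  | [], _ => []
  | c :: cs, d =>
    if PySem.Chars.isalnum c then c :: pvFA cs false
    else if pvSep c then (if d then pvFA cs d else '-' :: pvFA cs true)
    else pvFA cs d

-- the common token list (maximal alnum runs; other chars deleted; sep chars are boundaries)
def pvToks : List Char → List Char → List (List Char)
  | [], cur => if cur = [] then [] else [cur.reverse]
  | c :: cs, cur =>
    if PySem.Chars.isalnum c then pvToks cs (c :: cur)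
    else if pvSep c then (if cur = [] then pvToks cs [] else cur.reverse :: pvToks cs [])
    else pvToks cs cur

-- will A's remaining output end with a dash, given something was emitted and ends-with-dash = e?
def pvTrF : List Char → Bool → Bool
  | [], e => e
  | c :: cs, e =>
    if PySem.Chars.isalnum c then pvTrF cs false
    else if pvSep c then pvTrF cs true
    else pvTrF cs e

-- same from the state-true nothing-emitted-yet start
def pvTrT : List Char → Bool
  | [] => false
  | c :: cs => if PySem.Chars.isalnum c then pvTrF cs false else pvTrT cs

-- is the first non-deleted char a separator? (then A, from state false, emits a leading dash)
def pvLead : List Char → Bool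
  | [] => false
  | c :: cs => if PySem.Chars.isalnum c then false else if pvSep c then true else pvLead cs

theorem pv_alnum_not_space {c : Char} (h : PySem.Chars.isalnum c = true) :
    PySem.Chars.isspace c = false := by
  simp only [PySem.Chars.isalnum, PySem.Chars.isalpha, PySem.Chars.isdigit,
    PySem.Chars.isupper, PySem.Chars.islower, Bool.or_eq_true, Bool.and_eq_true,
    decide_eq_true_eq] at h
  simp only [PySem.Chars.isspace, Bool.or_eq_false_iff, Bool.and_eq_false_iff,
    decide_eq_false_iff_not]
  rcases h with (⟨h1, h2⟩ | ⟨h1, h2⟩) | ⟨h1, h2⟩ <;>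
    [ (have a1 : (65:Nat) ≤ c.toNat := h1; have a2 : c.toNat ≤ 90 := h2);
      (have a1 : (97:Nat) ≤ c.toNat := h1; have a2 : c.toNat ≤ 122 := h2);
      (have a1 : (48:Nat) ≤ c.toNat := h1; have a2 : c.toNat ≤ 57 := h2)] <;>
    omega

theorem pv_alnum_not_dash {c : Char} (h : PySem.Chars.isalnum c = true) : c ≠ '-' := by
  rintro rfl; exact absurd h (by decide)

theorem pv_fA_foldl (cs : List Char) (out : List Char) (d : Bool) :
    (cs.foldl pvStepA (out, d)).1 = out ++ pvFA cs d := by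
  induction cs generalizing out d with
  | nil => simp [pvFA]
  | cons c cs ih =>
    rw [List.foldl_cons]
    by_cases h1 : PySem.Chars.isalnum c = true
    · rw [show pvStepA (out, d) c = (out ++ [c], false) from by simp [pvStepA, h1]]
      rw [ih]; simp [pvFA, h1]
    · by_cases h2 : pvSep c = true
      · have h2' : (c == ' ' || c == '-' || c == '_') = true := by simpa [pvSep] using h2
        cases d
        · rw [show pvStepA (out, false) c = (out ++ ['-'], true) from by simp [pvStepA, h1, h2']]
          rw [ih]; simp [pvFA, h1, h2]
        · rw [show pvStepA (out, true) c = (out, true) from by simp [pvStepA, h1, h2']]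
          rw [ih]; simp [pvFA, h1, h2]
      · have h2' : (c == ' ' || c == '-' || c == '_') = false := by simpa [pvSep] using h2
        rw [show pvStepA (out, d) c = (out, d) from by simp [pvStepA, h1, h2']]
        rw [ih]; simp [pvFA, h1, h2]

-- B's split₀.go on the flatMap image computes the common tokens
theorem pv_go_toks (cs : List Char) (cur : List Char) (acc : List (List Char)) :
    PySem.Chars.split₀.go (cs.flatMap pvNorm) cur acc = acc.reverse ++ pvToks cs cur := by
  induction cs generalizing cur acc with
  | nil =>
    rcases cur with _ | ⟨x, xs⟩ <;> simp [PySem.Chars.split₀.go, pvToks]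
  | cons c cs ih =>
    rw [List.flatMap_cons]
    by_cases h1 : PySem.Chars.isalnum c = true
    · rw [show pvNorm c = [c] from by simp [pvNorm, h1]]
      rw [List.singleton_append, show PySem.Chars.split₀.go (c :: cs.flatMap pvNorm) cur acc
            = PySem.Chars.split₀.go (cs.flatMap pvNorm) (c :: cur) acc from by
          simp [PySem.Chars.split₀.go, pv_alnum_not_space h1]]
      rw [ih]; simp [pvToks, h1]
    · by_cases h2 : pvSep c = true
      · have h2' : (c == ' ' || c == '-' || c == '_') = true := by simpa [pvSep] using h2
        rw [show pvNorm c = [' '] from by simp [pvNorm, h1, h2']]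
        rcases cur with _ | ⟨x, xs⟩
        · rw [List.singleton_append, show PySem.Chars.split₀.go (' ' :: cs.flatMap pvNorm) [] acc
                = PySem.Chars.split₀.go (cs.flatMap pvNorm) [] acc from by
              simp [PySem.Chars.split₀.go, show PySem.Chars.isspace ' ' = true from by decide]]
          rw [ih]; simp [pvToks, h1, h2]
        · rw [List.singleton_append, show PySem.Chars.split₀.go (' ' :: cs.flatMap pvNorm) (x :: xs) acc
                = PySem.Chars.split₀.go (cs.flatMap pvNorm) [] ((x :: xs).reverse :: acc) from by
              simp [PySem.Chars.split₀.go, show PySem.Chars.isspace ' ' = true from by decide]]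
          rw [ih]; simp [pvToks, h1, h2]
      · have h2' : (c == ' ' || c == '-' || c == '_') = false := by simpa [pvSep] using h2
        rw [show pvNorm c = [] from by simp [pvNorm, h1, h2']]
        rw [List.nil_append, ih]; simp [pvToks, h1, h2]

theorem pv_fA_true_nil (cs : List Char) (h : ∀ c ∈ cs, PySem.Chars.isalnum c = false) :
    pvFA cs true = [] := by
  induction cs with
  | nil => rfl
  | cons c cs ih =>
    have hc := h c (by simp)
    have ih' := ih (fun x hx => h x (by simp [hx]))
    simp [pvFA, hc, ih']

theorem pv_toks_ne_nil (cs : List Char) (cur : List Char) (h : cur ≠ []) :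
    pvToks cs cur ≠ [] := by
  induction cs generalizing cur with
  | nil => simp [pvToks, h]
  | cons c cs ih =>
    by_cases h1 : PySem.Chars.isalnum c = true
    · simpa [pvToks, h1] using ih (c :: cur) (by simp)
    · by_cases h2 : pvSep c = true
      · simp [pvToks, h1, h2, h]
      · simpa [pvToks, h1, h2] using ih cur h

theorem pv_toks_nil_iff (cs : List Char) :
    pvToks cs [] = [] ↔ ∀ c ∈ cs, PySem.Chars.isalnum c = false := by
  induction cs with
  | nil => simp [pvToks]
  | cons c cs ih =>
    by_cases h1 : PySem.Chars.isalnum c = true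
    · simp only [pvToks, h1, if_true]
      constructor
      · intro h; exact absurd h (pv_toks_ne_nil cs [c] (by simp))
      · intro h; exact absurd (h c (by simp)) (by simp [h1])
    · have hc : PySem.Chars.isalnum c = false := by simpa using h1
      by_cases h2 : pvSep c = true <;>
      · rw [show pvToks (c :: cs) [] = pvToks cs [] from by simp [pvToks, h1, h2], ih]
        constructor
        · intro hall x hx
          rcases List.mem_cons.mp hx with rfl | hx'
          · exact hc
          · exact hall x hx'
        · intro hall x hx; exact hall x (List.mem_cons_of_mem _ hx)

theorem pv_trF_true (cs : List Char) :
    pvTrF cs true = if ∀ c ∈ cs, PySem.Chars.isalnum c = false then true else pvTrT cs := by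
  induction cs with
  | nil => simp [pvTrF]
  | cons c cs ih =>
    by_cases h1 : PySem.Chars.isalnum c = true
    · have : ¬ (∀ x ∈ c :: cs, PySem.Chars.isalnum x = false) := by
        intro h; exact absurd (h c (by simp)) (by simp [h1])
      simp [pvTrF, pvTrT, h1]
    · have heq : (∀ x ∈ c :: cs, PySem.Chars.isalnum x = false) ↔
          (∀ x ∈ cs, PySem.Chars.isalnum x = false) := by
        constructor
        · intro h x hx; exact h x (by simp [hx])
        · intro h x hx
          rcases List.mem_cons.mp hx with rfl | hx'
          · exact Bool.eq_false_iff.mpr h1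
          · exact h x hx'
      by_cases h2 : pvSep c = true <;>
        simp [pvTrF, pvTrT, h1, h2, ih]

-- the joint characterisation of A's future output against the common tokens
theorem pv_fA_char (cs : List Char) :
    (pvFA cs true = PySem.Chars.join ['-'] (pvToks cs []) ++ (if pvTrT cs then ['-'] else []))
    ∧ (∀ cur : List Char, cur ≠ [] →
        cur.reverse ++ pvFA cs false =
          PySem.Chars.join ['-'] (pvToks cs cur) ++ (if pvTrF cs false then ['-'] else [])) := by
  induction cs with
  | nil =>
    constructor
    · simp [pvFA, pvToks, pvTrT, PySem.Chars.join_nil]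
    · intro cur h
      simp [pvFA, pvToks, pvTrF, h, PySem.Chars.join_singleton]
  | cons c cs ih =>
    obtain ⟨IH1, IH2⟩ := ih
    by_cases h1 : PySem.Chars.isalnum c = true
    · constructor
      · have := IH2 [c] (by simp)
        simpa [pvFA, pvToks, pvTrT, h1] using this
      · intro cur h
        have := IH2 (c :: cur) (by simp)
        simp only [List.reverse_cons] at this
        simp [pvFA, pvToks, pvTrF, h1, List.append_assoc] at this ⊢
        exact this
    · by_cases h2 : pvSep c = true
      · constructor
        · simpa [pvFA, pvToks, pvTrT, h1, h2] using IH1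
        · intro cur h
          simp only [pvFA, pvToks, pvTrF, h1, h2, if_true, if_false, Bool.false_eq_true]
          by_cases hnil : pvToks cs [] = []
          · have hno : ∀ x ∈ cs, PySem.Chars.isalnum x = false := (pv_toks_nil_iff cs).mp hnil
            have hfa : pvFA cs true = [] := pv_fA_true_nil cs hno
            have htr : pvTrF cs true = true := by rw [pv_trF_true, if_pos hno]
            simp [hnil, hfa, htr, h, PySem.Chars.join_singleton]
          · rcases hq : pvToks cs [] with _ | ⟨q, qs⟩
            · exact absurd hq hnil
            · have hex : ¬ ∀ x ∈ cs, PySem.Chars.isalnum x = false := by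
                intro hno; exact hnil ((pv_toks_nil_iff cs).mpr hno)
              have htr : pvTrF cs true = pvTrT cs := by simp [pv_trF_true, hex]
              rw [if_neg (by simp [h]), PySem.Chars.join_cons_cons, htr]
              have := IH1
              rw [hq] at this
              simp [this, List.append_assoc]
      · constructor
        · simpa [pvFA, pvToks, pvTrT, h1, h2] using IH1
        · intro cur h
          simpa [pvFA, pvToks, pvTrF, h1, h2] using IH2 cur h

theorem pv_fA_false (cs : List Char) :
    pvFA cs false = (if pvLead cs then ['-'] else []) ++ pvFA cs true := by
  induction cs with
  | nil => simp [pvFA, pvLead]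
  | cons c cs ih =>
    by_cases h1 : PySem.Chars.isalnum c = true
    · simp [pvFA, pvLead, h1]
    · by_cases h2 : pvSep c = true
      · simp [pvFA, pvLead, h1, h2]
      · simp [pvFA, pvLead, h1, h2, ih]

theorem pv_toks_shape (cs : List Char) (cur : List Char)
    (hc : ∀ c ∈ cur, PySem.Chars.isalnum c = true) :
    ∀ t ∈ pvToks cs cur, t ≠ [] ∧ ∀ c ∈ t, PySem.Chars.isalnum c = true := by
  induction cs generalizing cur with
  | nil =>
    intro t ht
    rcases cur with _ | ⟨x, xs⟩
    · simp [pvToks] at ht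
    · have e : pvToks [] (x :: xs) = [(x :: xs).reverse] := by simp [pvToks]
      rw [e, List.mem_singleton] at ht
      subst ht
      exact ⟨by simp, fun c hcm => hc c (List.mem_reverse.mp hcm)⟩
  | cons c cs ih =>
    intro t ht
    by_cases h1 : PySem.Chars.isalnum c = true
    · have hcur : ∀ y ∈ c :: cur, PySem.Chars.isalnum y = true := by
        intro y hy
        rcases List.mem_cons.mp hy with rfl | hy'
        · exact h1
        · exact hc y hy'
      exact ih (c :: cur) hcur t (by simpa [pvToks, h1] using ht)
    · by_cases h2 : pvSep c = true
      · rcases cur with _ | ⟨x, xs⟩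
        · exact ih [] (by simp) t (by simpa [pvToks, h1, h2] using ht)
        · have e : pvToks (c :: cs) (x :: xs) = (x :: xs).reverse :: pvToks cs [] := by
            simp [pvToks, h1, h2]
          rw [e] at ht
          rcases List.mem_cons.mp ht with rfl | ht'
          · exact ⟨by simp, fun d hd => hc d (List.mem_reverse.mp hd)⟩
          · exact ih [] (by simp) t ht'
      · exact ih cur hc t (by simpa [pvToks, h1, h2] using ht)

theorem pv_join_head (ts : List (List Char))
    (h : ∀ t ∈ ts, t ≠ [] ∧ ∀ c ∈ t, PySem.Chars.isalnum c = true) :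
    ∀ hd, (PySem.Chars.join ['-'] ts).head? = some hd → PySem.Chars.isalnum hd = true := by
  rcases ts with _ | ⟨t, ts'⟩
  · simp [PySem.Chars.join_nil]
  · obtain ⟨hne, hal⟩ := h t (by simp)
    rcases t with _ | ⟨x, xs⟩
    · exact absurd rfl hne
    · intro hd hhd
      rcases ts' with _ | ⟨u, us⟩
      · rw [PySem.Chars.join_singleton] at hhd
        simp at hhd
        exact hal hd (by simp [← hhd])
      · rw [PySem.Chars.join_cons_cons] at hhd
        simp at hhd
        exact hal hd (by simp [← hhd])

theorem pv_join_last (ts : List (List Char))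
    (h : ∀ t ∈ ts, t ≠ [] ∧ ∀ c ∈ t, PySem.Chars.isalnum c = true) :
    ∀ l, (PySem.Chars.join ['-'] ts).getLast? = some l → PySem.Chars.isalnum l = true := by
  induction ts with
  | nil => simp [PySem.Chars.join_nil]
  | cons t ts' ih =>
    obtain ⟨hne, hal⟩ := h t (by simp)
    rcases ts' with _ | ⟨u, us⟩
    · rw [PySem.Chars.join_singleton]
      intro l hl
      exact hal l (List.mem_of_getLast? hl)
    · rw [PySem.Chars.join_cons_cons]
      intro l hl
      have hrest : PySem.Chars.join ['-'] (u :: us) ≠ [] := by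
        obtain ⟨hu, _⟩ := h u (by simp)
        rcases us with _ | ⟨v, vs⟩
        · rw [PySem.Chars.join_singleton]; exact hu
        · rw [PySem.Chars.join_cons_cons]
          rcases u with _ | ⟨y, ys⟩
          · exact absurd rfl hu
          · simp
      obtain ⟨y, ys, hj⟩ := List.exists_cons_of_ne_nil hrest
      rw [hj, List.append_assoc, List.getLast?_append_of_ne_nil _ (by simp),
        List.singleton_append, List.getLast?_cons_cons, ← hj] at hl
      exact ih (fun s hs => h s (by simp [hs])) l hl

theorem pv_strip_dashes (J la lb : List Char)
    (ha : la = [] ∨ la = ['-']) (hb : lb = [] ∨ lb = ['-'])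
    (hh : ∀ hd, J.head? = some hd → hd ≠ '-')
    (hl : ∀ l, J.getLast? = some l → l ≠ '-') :
    PySem.Chars.stripChars (la ++ J ++ lb) ['-'] = J := by
  rcases J with _ | ⟨h, t⟩
  · rcases ha with rfl | rfl <;> rcases hb with rfl | rfl <;> decide
  · have hh' : h ≠ '-' := hh h rfl
    have hlast : (h :: t).getLast (by simp) ≠ '-' :=
      hl _ ((List.getLast?_eq_some_getLast (l := h :: t) (by simp)))
    simp only [PySem.Chars.stripChars]
    have stage1 : List.dropWhile (fun c => ['-'].contains c) (la ++ (h :: t) ++ lb) =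
        (h :: t) ++ lb := by
      rcases ha with rfl | rfl
      · rw [List.nil_append, List.cons_append, List.dropWhile_cons_of_neg (by simp [hh'])]
      · rw [List.append_assoc, List.singleton_append,
          List.dropWhile_cons_of_pos (by simp), List.cons_append,
          List.dropWhile_cons_of_neg (by simp [hh'])]
    rw [stage1]
    have hrev2 : (h :: t).reverse = (h :: t).getLast (by simp) :: (h :: t).dropLast.reverse := by
      conv_lhs => rw [(List.dropLast_append_getLast (l := h :: t) (by simp)).symm]
      simp
    have stage2 : List.dropWhile (fun c => ['-'].contains c) ((h :: t) ++ lb).reverse =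
        (h :: t).reverse := by
      rcases hb with rfl | rfl
      · rw [List.append_nil, hrev2, List.dropWhile_cons_of_neg (by simp [hlast]), ← hrev2]
      · rw [List.reverse_append, List.reverse_singleton, List.singleton_append,
          List.dropWhile_cons_of_pos (by simp), hrev2,
          List.dropWhile_cons_of_neg (by simp [hlast]), ← hrev2]
    rw [stage2]
    simp

-- main list-level fact: A's stripped output is the dash-join of the common tokens
theorem pv_main (cs : List Char) :
    PySem.Chars.stripChars (pvFA cs false) ['-'] =
      PySem.Chars.join ['-'] (pvToks cs []) := by
  have h1 := (pv_fA_char cs).1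
  have h2 := pv_fA_false cs
  rw [h2, h1]
  have hshape := pv_toks_shape cs [] (by simp)
  rw [← List.append_assoc]
  exact pv_strip_dashes _ _ _
    (by split <;> simp) (by split <;> simp)
    (fun hd hhd => pv_alnum_not_dash (pv_join_head _ hshape hd hhd))
    (fun l hl => pv_alnum_not_dash (pv_join_last _ hshape l hl))

theorem pv_join_ne_nil (t : List Char) (ts : List (List Char)) (h : t ≠ []) :
    PySem.Chars.join ['-'] (t :: ts) ≠ [] := by
  rcases ts with _ | ⟨u, us⟩
  · rw [PySem.Chars.join_singleton]; exact h
  · rw [PySem.Chars.join_cons_cons]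
    rcases t with _ | ⟨x, xs⟩
    · exact absurd rfl h
    · simp

-- ===== VERDICT (by name: the statement is the Claim_ definition above) =====
theorem github_slug_spec : Claim_equal_github_slug := by
  intro text _
  unfold Spec_github_slug github_slug github_slug_alt
  rw [pv_fA_foldl, List.nil_append]
  set cs := (PySem.Str.lower text).toList with hcs
  -- B's split list, at the char-list level
  have hsplit : (PySem.Str.split₀ (String.ofList (cs.flatMap pvNorm))).map String.toList
      = pvToks cs [] := by
    rw [PySem.Str.split₀_map_toList]
    simp only [String.toList_ofList]
    simpa [PySem.Chars.split₀] using pv_go_toks cs [] []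
  -- A's stripped string, at the char-list level
  have hA : (PySem.Str.stripChars (String.ofList (pvFA cs false)) "-").toList
      = PySem.Chars.join ['-'] (pvToks cs []) := by
    rw [PySem.Str.toList_stripChars]
    simp only [String.toList_ofList]
    simpa using pv_main cs
  cases hsp : PySem.Str.split₀ (String.ofList (cs.flatMap pvNorm)) with
  | nil =>
    have htn : pvToks cs [] = [] := by rw [← hsplit, hsp]; simp
    have : PySem.Str.stripChars (String.ofList (pvFA cs false)) "-" = "" := by
      apply String.toList_inj.mp
      rw [hA, htn, PySem.Chars.join_nil]
      rfl
    rw [if_pos this]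
  | cons w ws =>
    have htn : pvToks cs [] = w.toList :: ws.map String.toList := by
      rw [← hsplit, hsp]; simp
    have hw : w.toList ≠ [] := by
      have := (pv_toks_shape cs [] (by simp) w.toList (by rw [htn]; simp)).1
      exact this
    have hne : PySem.Str.stripChars (String.ofList (pvFA cs false)) "-" ≠ "" := by
      intro h
      have := congrArg String.toList h
      rw [hA, htn] at this
      exact pv_join_ne_nil _ _ hw (by simpa using this)
    rw [if_neg hne]
    apply String.toList_inj.mp
    rw [hA, PySem.Str.toList_join, htn]
    rfl
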